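-- pv_equiv track=rewrite | github.com/euichansong/TIL | 프로그래머스/2/132265. 롤케이크 자르기/롤케이크 자르기.py | solution
-- ===== SOURCE A (Python) =====
-- def solution(topping):
--     answer = 0
--     left_set = set()
--     right_set = set()
--
--     # 왼쪽에서 순차적으로 등장하는 토핑 종류 수 기록
--     left_counts = []
--     for t in topping:
--         left_set.add(t)
--         left_counts.append(len(left_set))
--
--     # 오른쪽에서 순차적으로 등장하는 토핑 종류 수 기록
--     right_counts = [0] * len(topping)
--     for i in range(len(topping) - 1, -1, -1):
--         right_set.add(topping[i])
--         right_counts[i] = len(right_set)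
--
--     # 양쪽 종류 수 비교
--     for i in range(len(topping) - 1):
--         if left_counts[i] == right_counts[i + 1]:
--             answer += 1
--
--     return answer
-- ===== SOURCE B (Python) =====
-- def solution(topping):
--     # One pass with a count map of the unseen part: no prefix/suffix arrays.
--     counts = {}
--     for t in topping:
--         counts[t] = counts.get(t, 0) + 1
--     right_kinds = len(counts)   # distinct kinds still to the right of the cut
--     left = set()                # kinds already to the left
--     answer = 0
--     for t in topping:
--         left.add(t)
--         counts[t] -= 1
--         if counts[t] == 0:
--             right_kinds -= 1
--         if len(left) == right_kinds:
--             answer += 1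
--     return answer
-- ===== Notes on version B (the rewrite author's own statement) =====
-- stated objective: alternative
-- what changed: Replaces A's three passes with materialized prefix/suffix distinct-count arrays by a single sweep that maintains a count map of the unseen suffix and an integer number of remaining distinct kinds, comparing it with the seen-set size at each cut.
import Mathlib
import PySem

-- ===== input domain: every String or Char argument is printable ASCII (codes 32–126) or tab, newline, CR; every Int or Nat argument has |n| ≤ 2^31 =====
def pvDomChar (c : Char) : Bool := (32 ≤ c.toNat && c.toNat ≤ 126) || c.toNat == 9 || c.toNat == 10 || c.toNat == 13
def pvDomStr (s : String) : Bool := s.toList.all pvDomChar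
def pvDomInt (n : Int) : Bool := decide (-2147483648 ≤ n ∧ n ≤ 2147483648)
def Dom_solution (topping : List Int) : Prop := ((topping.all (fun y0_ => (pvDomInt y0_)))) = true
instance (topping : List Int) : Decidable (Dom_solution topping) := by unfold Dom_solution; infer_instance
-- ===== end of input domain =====

-- B replaces A's three passes (prefix distinct-count array, suffix distinct-count array, compare pass)
-- by one sweep over a count map of the unseen suffix; the return values are proved equal below.

-- ===== PORT A =====
def solution (topping : List Int) : Int :=
  let leftCounts :=
    (topping.foldl
      (fun (p : PySem.Set Int × List Int) t =>
        let ls := PySem.Set.add p.1 t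
        (ls, p.2 ++ [PySem.Set.len ls]))
      (PySem.Set.empty, ([] : List Int))).2
  let n := topping.length
  let rightCounts :=
    ((PySem.List.pyRange ((n : Int) - 1) (-1) (-1)).foldl
      (fun (p : PySem.Set Int × List Int) i =>
        let rs := PySem.Set.add p.1 (PySem.List.pyGetD topping i 0)
        (rs, p.2.set i.toNat (PySem.Set.len rs)))
      (PySem.Set.empty, List.replicate n (0 : Int))).2
  (PySem.List.pyRange 0 ((n : Int) - 1) 1).foldl
    (fun (answer : Int) i =>
      if PySem.List.pyGetD leftCounts i 0 == PySem.List.pyGetD rightCounts (i + 1) 0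
      then answer + 1 else answer) 0

-- ===== PORT B =====
def solution_alt (topping : List Int) : Int :=
  let counts := topping.foldl
    (fun (d : PySem.Dict Int Int) t => d.insert t (d.getD t 0 + 1)) PySem.Dict.empty
  (topping.foldl
    (fun (s : Int × PySem.Set Int × PySem.Dict Int Int × Int) t =>
      let left := PySem.Set.add s.2.1 t
      let cnts := s.2.2.1.insert t (s.2.2.1.getD t 0 - 1)
      let rk := if cnts.getD t 0 == 0 then s.2.2.2 - 1 else s.2.2.2
      (if PySem.Set.len left == rk then s.1 + 1 else s.1, left, cnts, rk))
    (0, PySem.Set.empty, counts, (counts.size : Int))).1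

-- ===== PRECONDITION & SPEC =====
def Spec_solution (topping : List Int) (out : Int) : Prop := out = solution_alt topping
instance (topping : List Int) (out : Int) : Decidable (Spec_solution topping out) := by unfold Spec_solution; infer_instance

-- ===== CLAIM (what is proved, stated in full; the proofs are below) =====
def Claim_equal_solution : Prop := ∀ (topping : List Int), Dom_solution topping → Spec_solution topping (solution topping)

-- ===== LEMMAS AND PROOFS =====

-- number of distinct elements of a list
def dc (l : List Int) : Nat := (PySem.Set.ofList l).length

theorem len_eq_dc (s : PySem.Set Int) (l : List Int)
    (hnd : s.Nodup) (hmem : ∀ x, x ∈ s ↔ x ∈ l) : s.length = dc l := by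
  have hperm : s.Perm (PySem.Set.ofList l) := by
    rw [List.perm_ext_iff_of_nodup hnd (PySem.Set.nodup_ofList l)]
    intro a; rw [hmem, PySem.Set.mem_ofList]
  exact hperm.length_eq

theorem dc_cons_mem (t : Int) (l : List Int) (h : t ∈ l) : dc (t :: l) = dc l := by
  have : (t :: (PySem.Set.ofList l).discard t).Perm (PySem.Set.ofList l) := by
    rw [List.perm_ext_iff_of_nodup]
    · intro a
      simp only [List.mem_cons, PySem.Set.mem_discard, PySem.Set.mem_ofList]
      constructor
      · rintro (rfl | ⟨ha, _⟩) <;> [exact h; exact ha]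
      · intro ha; by_cases hat : a = t
        · exact Or.inl hat
        · exact Or.inr ⟨ha, hat⟩
    · exact List.nodup_cons.mpr ⟨by simp [PySem.Set.mem_discard], PySem.Set.nodup_discard _ _ (PySem.Set.nodup_ofList l)⟩
    · exact PySem.Set.nodup_ofList l
  unfold dc
  rw [PySem.Set.ofList_cons]
  exact this.length_eq

theorem dc_cons_not_mem (t : Int) (l : List Int) (h : t ∉ l) : dc (t :: l) = dc l + 1 := by
  unfold dc
  rw [PySem.Set.ofList_cons]
  have : (PySem.Set.ofList l).discard t = PySem.Set.ofList l := by
    unfold PySem.Set.discard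
    apply List.filter_eq_self.mpr
    intro a ha
    simp only [Bool.not_eq_eq_eq_not, Bool.not_true, beq_eq_false_iff_ne, ne_eq]
    intro hat; rw [hat] at ha; exact h ((PySem.Set.mem_ofList l t).mp ha)
  rw [this]; simp [Nat.add_comm]

theorem B_loop (rest : List Int) : ∀ (a : Int) (left : PySem.Set Int)
    (d : PySem.Dict Int Int) (rk : Int),
    (∀ k, d.getD k 0 = (rest.count k : Int)) → rk = (dc rest : Int) →
    (rest.foldl
      (fun (s : Int × PySem.Set Int × PySem.Dict Int Int × Int) t =>
        let left := PySem.Set.add s.2.1 t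
        let cnts := s.2.2.1.insert t (s.2.2.1.getD t 0 - 1)
        let rk := if cnts.getD t 0 == 0 then s.2.2.2 - 1 else s.2.2.2
        (if PySem.Set.len left == rk then s.1 + 1 else s.1, left, cnts, rk))
      (a, left, d, rk)).1
    = a + ((List.range rest.length).countP
        (fun j => decide ((PySem.Set.update left (rest.take (j + 1))).length
                          = dc (rest.drop (j + 1)))) : Int) := by
  induction rest with
  | nil => intro a left d rk hd hrk; simp
  | cons t rest ih =>
    intro a left d rk hd hrk
    rw [List.foldl_cons]
    simp only []
    have hdt : (d.insert t (d.getD t 0 - 1)).getD t 0 = (rest.count t : Int) := by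
      rw [PySem.Dict.getD_insert_self, hd t, List.count_cons_self]; push_cast; ring
    have hd' : ∀ k, (d.insert t (d.getD t 0 - 1)).getD k 0 = (rest.count k : Int) := by
      intro k
      by_cases hk : k = t
      · subst hk; exact hdt
      · rw [PySem.Dict.getD_insert_of_ne _ _ _ hk, hd k]; simp [List.count_cons]; exact fun h => hk h.symm
    have hrk' : (if (d.insert t (d.getD t 0 - 1)).getD t 0 == 0 then rk - 1 else rk)
        = (dc rest : Int) := by
      rw [hdt, hrk]
      by_cases hmem : t ∈ rest
      · have hne : rest.count t ≠ 0 := by have := List.count_pos_iff.mpr hmem; omega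
        have : ((rest.count t : Int) == 0) = false := by
          simp [beq_iff_eq]; exact_mod_cast hne
        rw [this, dc_cons_mem t rest hmem]; simp
      · have h0 : rest.count t = 0 := List.count_eq_zero.mpr hmem
        rw [h0]
        simp only [Nat.cast_zero, beq_self_eq_true, if_true]
        rw [dc_cons_not_mem t rest hmem]; push_cast; ring
    rw [ih _ _ _ _ hd' hrk']
    -- now the arithmetic / countP reshaping
    rw [List.length_cons, List.range_succ_eq_map, List.countP_cons, List.countP_map]
    have hpred : ∀ j, ((fun j => decide ((PySem.Set.update left ((t :: rest).take (j + 1))).length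
                          = dc ((t :: rest).drop (j + 1)))) ∘ (fun i => i + 1)) j
        = (fun j => decide ((PySem.Set.update (left.add t) (rest.take (j + 1))).length
                          = dc (rest.drop (j + 1)))) j := by
      intro j
      simp only [Function.comp_apply, List.take_succ_cons, List.drop_succ_cons,
        PySem.Set.update_cons]
      rfl
    rw [funext hpred]
    have hcond0 : (PySem.Set.update left ((t :: rest).take (0 + 1))).length
        = (PySem.Set.add left t).length := by
      simp [PySem.Set.update_cons, PySem.Set.update_nil]
    have hlen : PySem.Set.len (left.add t) = ((left.add t).length : Int) := by
      simp [PySem.Set.len]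
    by_cases hc : (left.add t).length = dc rest
    · have : (PySem.Set.len (left.add t) == (dc rest : Int)) = true := by
        rw [hlen]; simp [beq_iff_eq]; exact_mod_cast hc
      rw [hrk', this]
      simp only [if_true, List.drop_succ_cons, List.drop_zero, hcond0, hc, decide_true]
      push_cast; ring
    · have : (PySem.Set.len (left.add t) == (dc rest : Int)) = false := by
        rw [hlen]; simp [beq_iff_eq]; exact_mod_cast hc
      rw [hrk', this]
      simp only [if_false, List.drop_succ_cons, List.drop_zero, hcond0, hc, decide_false]
      push_cast; ring

theorem A_left (l : List Int) : ∀ (s : PySem.Set Int) (acc : List Int),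
    (l.foldl
      (fun (p : PySem.Set Int × List Int) t =>
        let ls := PySem.Set.add p.1 t
        (ls, p.2 ++ [PySem.Set.len ls])) (s, acc)).2
    = acc ++ (List.range l.length).map
        (fun i => ((PySem.Set.update s (l.take (i + 1))).length : Int)) := by
  induction l with
  | nil => intro s acc; simp
  | cons t l ih =>
    intro s acc
    rw [List.foldl_cons]
    simp only []
    rw [ih]
    rw [List.length_cons, List.range_succ_eq_map, List.map_cons, List.map_map]
    have h0 : ((PySem.Set.update s ((t :: l).take (0 + 1))).length : Int)
        = PySem.Set.len (s.add t) := by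
      simp [PySem.Set.update_cons, PySem.Set.update_nil, PySem.Set.len]
    have hf : ∀ i : Nat, ((fun i => ((PySem.Set.update s ((t :: l).take (i + 1))).length : Int)) ∘ (fun i => i + 1)) i
        = (fun i => ((PySem.Set.update (s.add t) (l.take (i + 1))).length : Int)) i := by
      intro i
      simp only [Function.comp_apply, List.take_succ_cons, PySem.Set.update_cons]
    rw [h0, funext hf]
    simp

theorem A_right (tp : List Int) : ∀ (m : Nat), m ≤ tp.length →
    ∀ (s : PySem.Set Int) (arr : List Int), arr.length = tp.length →
    s.Nodup → (∀ x, x ∈ s ↔ x ∈ tp.drop m) →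
    ((PySem.List.pyRange ((m : Int) - 1) (-1) (-1)).foldl
      (fun (p : PySem.Set Int × List Int) i =>
        let rs := PySem.Set.add p.1 (PySem.List.pyGetD tp i 0)
        (rs, p.2.set i.toNat (PySem.Set.len rs))) (s, arr)).2
    = (List.range m).map (fun j => ((dc (tp.drop j)) : Int)) ++ arr.drop m := by
  intro m
  induction m with
  | zero =>
    intro _ s arr _ _ _
    have : PySem.List.pyRange ((0 : Nat) - 1) (-1) (-1) = [] := by
      rw [PySem.List.pyRange_neg_one]; norm_num
    rw [this]; simp
  | succ m ih =>
    intro hm s arr harr hnd hmem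
    have hmlt : m < tp.length := by omega
    have hstep : ((m + 1 : Nat) : Int) - 1 = (m : Int) := by push_cast; ring
    have hcons : PySem.List.pyRange ((m : Int)) (-1) (-1)
        = (m : Int) :: PySem.List.pyRange ((m : Int) - 1) (-1) (-1) := by
      exact PySem.List.pyRange_neg_one_cons (by omega)
    rw [hstep, hcons, List.foldl_cons]
    simp only []
    have hget : PySem.List.pyGetD tp (m : Int) 0 = tp[m] := by
      rw [PySem.List.pyGetD_natCast, List.getD_eq_getElem _ _ hmlt]
    have hdropm : tp.drop m = tp[m] :: tp.drop (m + 1) := (List.getElem_cons_drop hmlt).symm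
    have hnd' : (s.add (PySem.List.pyGetD tp (m : Int) 0)).Nodup := by
      rw [hget]; exact PySem.Set.nodup_add _ _ hnd
    have hmem' : ∀ x, x ∈ s.add (PySem.List.pyGetD tp (m : Int) 0) ↔ x ∈ tp.drop m := by
      intro x
      rw [hget, PySem.Set.mem_add, hdropm, List.mem_cons, hmem x, or_comm]
    have hlen : PySem.Set.len (s.add (PySem.List.pyGetD tp (m : Int) 0)) = ((dc (tp.drop m)) : Int) := by
      have := len_eq_dc _ _ hnd' hmem'
      simp only [PySem.Set.len]
      exact_mod_cast this
    have harr' : (arr.set (m : Int).toNat (PySem.Set.len (s.add (PySem.List.pyGetD tp (m : Int) 0)))).length = tp.length := by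
      simp [harr]
    rw [ih (by omega) _ _ harr' hnd' hmem']
    have htoNat : ((m : Int)).toNat = m := by simp
    rw [htoNat, hlen]
    have hdset : (arr.set m ((dc (tp.drop m) : Int))).drop m
        = ((dc (tp.drop m)) : Int) :: arr.drop (m + 1) := by
      rw [List.drop_set]
      simp only [lt_irrefl, if_neg (lt_irrefl m), Nat.sub_self]
      have : arr.drop m = arr[m] :: arr.drop (m + 1) := (List.getElem_cons_drop (by omega)).symm
      rw [this]; rfl
    rw [hdset, List.range_succ, List.map_append]
    simp

def pcut (tp : List Int) (j : Nat) : Bool := decide (dc (tp.take (j + 1)) = dc (tp.drop (j + 1)))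


theorem solB_eq (tp : List Int) :
    solution_alt tp = ((List.range tp.length).countP (pcut tp) : Int) := by
  unfold solution_alt
  simp only [PySem.Dict.foldl_insert_getD_add_one_eq_counter]
  have hsz : ((PySem.Dict.counter tp).size : Int) = (dc tp : Int) := by
    have h := congrArg List.length (PySem.Dict.keys_counter (κ := Int) tp)
    simp only [PySem.Dict.keys, PySem.Dict.size, List.length_map] at h ⊢
    rw [h]; rfl
  rw [hsz, B_loop tp 0 PySem.Set.empty _ _ (fun k => PySem.Dict.getD_counter tp k) rfl]
  rw [List.countP_congr ?_]
  · ring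
  · intro j _
    simp only [PySem.Set.empty, PySem.Set.update_nil_left, pcut, dc]
    exact Iff.rfl

theorem countP_bridge (tp : List Int) :
    (List.range tp.length).countP (pcut tp) = (List.range (tp.length - 1)).countP (pcut tp) := by
  cases tp with
  | nil => simp
  | cons h t =>
    have hn : (h :: t).length = ((h :: t).length - 1) + 1 := by simp
    rw [hn, List.range_succ, List.countP_append]
    have hfalse : pcut (h :: t) t.length = false := by
      unfold pcut
      have h1 : t.length + 1 = (h :: t).length := by simp
      rw [h1, List.take_of_length_le (le_refl _), List.drop_of_length_le (le_refl _)]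
      have : dc (h :: t) ≠ dc [] := by
        unfold dc
        rw [PySem.Set.ofList_cons]
        simp
      simpa using this
    simp [hfalse]

theorem solA_eq (tp : List Int) :
    solution tp = ((List.range (tp.length - 1)).countP (pcut tp) : Int) := by
  unfold solution
  rw [A_left]
  have hmemnil : ∀ x : Int, x ∈ (PySem.Set.empty : PySem.Set Int) ↔ x ∈ tp.drop tp.length := by
    simp [PySem.Set.empty]
  have hAR := A_right tp tp.length (le_refl _) PySem.Set.empty (List.replicate tp.length 0)
    (by simp) (by simp [PySem.Set.empty]) hmemnil
  simp only [hAR, List.drop_replicate]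
  simp only [Nat.sub_self, List.replicate_zero, List.append_nil, List.nil_append]
  cases tp with
  | nil => simp [PySem.List.pyRange]
  | cons h0 t0 =>
    set tp := h0 :: t0 with htp
    have hn1 : ((tp.length : Int) - 1) = ((tp.length - 1 : Nat) : Int) := by
      simp [htp]
    rw [hn1, PySem.List.pyRange_zero_natCast, List.foldl_map,
        PySem.List.foldl_if_add_one]
    rw [List.countP_congr]
    · ring
    · intro k hk
      rw [List.mem_range] at hk
      have hklt : k < tp.length := by omega
      have hk1lt : k + 1 < tp.length := by omega
      have hL : PySem.List.pyGetD
          ((List.range tp.length).map (fun i => ((PySem.Set.update PySem.Set.empty (tp.take (i + 1))).length : Int))) (k : Int) 0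
          = (dc (tp.take (k + 1)) : Int) := by
        rw [PySem.List.pyGetD_natCast, PySem.List.getD_map_range _ _ _ _ hklt]
        simp [PySem.Set.empty, PySem.Set.update_nil_left, dc]
      have hR : PySem.List.pyGetD
          ((List.range tp.length).map (fun j => ((dc (tp.drop j)) : Int))) ((k : Int) + 1) 0
          = (dc (tp.drop (k + 1)) : Int) := by
        have : ((k : Int) + 1) = ((k + 1 : Nat) : Int) := by push_cast; ring
        rw [this, PySem.List.pyGetD_natCast, PySem.List.getD_map_range _ _ _ _ hk1lt]
      rw [hL, hR]
      by_cases hc : dc (tp.take (k + 1)) = dc (tp.drop (k + 1))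
      · simp [pcut, hc]
      · simp only [pcut, hc, decide_false]
        simp [beq_iff_eq]
        exact_mod_cast hc

-- ===== VERDICT (by name: the statement is the Claim_ definition above) =====
theorem solution_spec : Claim_equal_solution := by
  intro tp _
  unfold Spec_solution
  rw [solA_eq, solB_eq, countP_bridge]
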